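-- pv_equiv track=rewrite | github.com/leoegito/estudosPython | HackerRank/sugestorProdutos.py | getProductSuggestions
-- ===== SOURCE A (Python) =====
-- def getProductSuggestions(products, search):
--     # Write your code here
--     matches = []
--     for item in search:
--         searchMatch = []
--         for product in products:
--             if item == product[0:len(item)]:
--                 searchMatch.append(product)
--         matches.append(searchMatch)
--     return matches
-- ===== SOURCE B (Python) =====
-- def getProductSuggestions(products, search):
--     # Prefix index: register each product once under every one of its
--     # prefixes (including ""); each search term is then a single lookup,
--     # with no scan over the products per term.
--     index = {}
--     for product in products:
--         for i in range(len(product) + 1):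
--             index.setdefault(product[:i], []).append(product)
--     return [index.get(term, []) for term in search]
-- ===== Notes on version B (the rewrite author's own statement) =====
-- stated objective: faster
-- what changed: Replaces A's nested scan (every product re-scanned for each search term) by a prefix index built in one pass over the products (each product registered under every one of its prefixes, including the empty one); each search term then becomes a single dictionary lookup with no per-term scan.
import Mathlib
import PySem

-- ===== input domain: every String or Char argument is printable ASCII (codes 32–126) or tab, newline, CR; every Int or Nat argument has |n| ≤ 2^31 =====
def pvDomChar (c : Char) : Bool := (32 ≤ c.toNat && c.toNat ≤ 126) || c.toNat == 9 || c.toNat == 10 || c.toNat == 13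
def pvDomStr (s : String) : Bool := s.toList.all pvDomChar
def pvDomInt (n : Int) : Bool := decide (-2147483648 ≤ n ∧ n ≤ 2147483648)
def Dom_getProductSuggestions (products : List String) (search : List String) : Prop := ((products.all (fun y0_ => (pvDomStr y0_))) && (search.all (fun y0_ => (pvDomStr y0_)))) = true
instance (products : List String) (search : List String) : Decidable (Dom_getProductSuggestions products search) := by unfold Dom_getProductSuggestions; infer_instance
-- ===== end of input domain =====

-- B replaces A's per-term scan of all products by a prefix index built once
-- (each product registered under every one of its prefixes); each term is one lookup.


-- ===== PORT A =====
def getProductSuggestions (products : List String) (search : List String) : List (List String) :=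
  search.foldl (fun ms item =>
    ms ++ [products.foldl (fun searchMatch product =>
      if item == PySem.Str.slice product (some 0) (some (PySem.Str.len item))
      then searchMatch ++ [product] else searchMatch) ([] : List String)]) []

-- ===== PORT B =====
-- for i in range(len(product)+1): index.setdefault(product[:i], []).append(product)
def pvIdxStep (d : PySem.Dict String (List String)) (product : String) : PySem.Dict String (List String) :=
  (PySem.List.pyRange 0 (PySem.Str.len product + 1) 1).foldl
    (fun d' i => d'.modify (PySem.Str.slice product (some 0) (some i)) [] (· ++ [product])) d

def getProductSuggestions_alt (products : List String) (search : List String) : List (List String) :=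
  let index := products.foldl pvIdxStep PySem.Dict.empty
  search.map (fun t => index.getD t [])

-- ===== PRECONDITION & SPEC =====
def Spec_getProductSuggestions (products : List String) (search : List String) (out : List (List String)) : Prop := out = getProductSuggestions_alt products search
instance (products : List String) (search : List String) (out : List (List String)) : Decidable (Spec_getProductSuggestions products search out) := by unfold Spec_getProductSuggestions; infer_instance

-- ===== CLAIM (what is proved, stated in full; the proofs are below) =====
def Claim_equal_getProductSuggestions : Prop := ∀ (products : List String) (search : List String), Dom_getProductSuggestions products search → Spec_getProductSuggestions products search (getProductSuggestions products search)

-- ===== LEMMAS AND PROOFS =====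

-- A's slice test "item == product[0:len(item)]" is exactly startswith(product, item)
lemma pred_eq (t p : String) :
    (t == PySem.Str.slice p (some 0) (some (PySem.Str.len t))) = PySem.Str.startswith p t := by
  rw [Bool.eq_iff_iff]
  simp only [beq_iff_eq, PySem.Str.startswith_eq]
  rw [PySem.Chars.startswith_iff]
  have hs : (PySem.Str.slice p (some 0) (some (PySem.Str.len t))).toList = p.toList.take t.toList.length := by
    rw [PySem.Str.toList_slice, PySem.Chars.slice_eq_listSlice, PySem.List.slice_zero_start,
      PySem.Str.len_eq, PySem.List.slice_to_natCast]
  rw [List.prefix_iff_eq_take]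
  constructor
  · intro h
    have := congrArg String.toList h
    rw [hs] at this
    exact this
  · intro h
    exact String.toList_injective (by rw [hs]; exact h)

lemma A_eq (products search : List String) :
    getProductSuggestions products search
      = search.map (fun t => products.filter (fun p => PySem.Str.startswith p t)) := by
  unfold getProductSuggestions
  rw [PySem.List.foldl_append_singleton_eq_map, List.nil_append]
  apply List.map_congr_left
  intro item _
  rw [PySem.List.foldl_append_if (fun product => (item == PySem.Str.slice product (some 0) (some (PySem.Str.len item)))) (fun x => x) products []]
  simp only [List.map_id_fun', id, List.nil_append]
  exact List.filter_congr (fun p _ => pred_eq item p)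

-- the list of prefixes of p, as produced by the inner loop of pvIdxStep
def prefList (p : String) : List String :=
  (PySem.List.pyRange 0 (PySem.Str.len p + 1) 1).map
    (fun i => PySem.Str.slice p (some 0) (some i))

lemma prefList_eq (p : String) :
    prefList p = (List.range (p.toList.length + 1)).map (fun k => String.ofList (p.toList.take k)) := by
  unfold prefList
  rw [PySem.Str.len_eq, show ((p.toList.length : Int) + 1) = ((p.toList.length + 1 : Nat) : Int) by push_cast; ring,
    PySem.List.pyRange_zero_natCast, List.map_map]
  apply List.map_congr_left
  intro k _
  apply String.toList_injective
  simp only [Function.comp_apply, PySem.Str.toList_slice, PySem.Chars.slice_eq_listSlice,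
    PySem.List.slice_zero_start, PySem.List.slice_to_natCast, String.toList_ofList]

lemma mem_prefList (p t : String) :
    t ∈ prefList p ↔ PySem.Str.startswith p t = true := by
  rw [prefList_eq, PySem.Str.startswith_eq, PySem.Chars.startswith_iff, List.mem_map]
  constructor
  · rintro ⟨k, _, rfl⟩
    rw [String.toList_ofList]
    exact List.take_prefix k p.toList
  · intro h
    refine ⟨t.toList.length, ?_, ?_⟩
    · rw [List.mem_range]
      exact Nat.lt_succ_of_le h.length_le
    · rw [← List.prefix_iff_eq_take.mp h, String.ofList_toList]

lemma nodup_prefList (p : String) : (prefList p).Nodup := by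
  rw [prefList_eq]
  refine List.Nodup.map_on ?_ List.nodup_range
  intro k1 h1 k2 h2 h
  have hl := congrArg (fun s => s.toList.length) h
  simp only [String.toList_ofList, List.length_take] at hl
  rw [List.mem_range] at h1 h2
  omega

-- a nodup key list filtered for one key
lemma filter_beq_nodup {L : List String} (hnd : L.Nodup) (t : String) :
    L.filter (fun k => k == t) = if t ∈ L then [t] else [] := by
  rw [List.filter_beq]
  rcases Decidable.em (t ∈ L) with h | h
  · have h1 : L.count t = 1 :=
      Nat.le_antisymm (List.nodup_iff_count_le_one.mp hnd t) (List.count_pos_iff.mpr h)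
    rw [h1, if_pos h]
    rfl
  · rw [List.count_eq_zero_of_not_mem h, if_neg h]
    rfl

lemma step_getD (d : PySem.Dict String (List String)) (p t : String) :
    (pvIdxStep d p).getD t []
      = d.getD t [] ++ (if PySem.Str.startswith p t then [p] else []) := by
  have key : pvIdxStep d p
      = ((prefList p).map (fun k => (k, p))).foldl
          (fun d' pr => d'.modify pr.1 [] (· ++ [pr.2])) d := by
    unfold pvIdxStep prefList
    rw [List.foldl_map, List.foldl_map]
  rw [key, PySem.Dict.getD_foldl_modify_append, List.filter_map, List.map_map]
  have : (List.filter ((fun pr => pr.1 == t) ∘ fun k => (k, p)) (prefList p))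
      = (prefList p).filter (fun k => k == t) := rfl
  rw [this, filter_beq_nodup (nodup_prefList p) t]
  rcases Decidable.em (PySem.Str.startswith p t = true) with h | h
  · rw [if_pos ((mem_prefList p t).mpr h), if_pos h]
    rfl
  · rw [if_neg (fun hm => h ((mem_prefList p t).mp hm)), if_neg h]
    rfl

lemma outer_getD (ps : List String) (d : PySem.Dict String (List String)) (t : String) :
    (ps.foldl pvIdxStep d).getD t []
      = d.getD t [] ++ ps.filter (fun p => PySem.Str.startswith p t) := by
  induction ps generalizing d with
  | nil => simp
  | cons p ps ih =>
    simp only [List.foldl_cons, List.filter_cons]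
    rw [ih, step_getD]
    by_cases h : PySem.Str.startswith p t = true
    · simp only [PySem.Str.startswith_eq] at h ⊢
      simp [h, List.append_assoc]
    · simp only [PySem.Str.startswith_eq] at h ⊢
      simp [h]

lemma B_eq (products search : List String) :
    getProductSuggestions_alt products search
      = search.map (fun t => products.filter (fun p => PySem.Str.startswith p t)) := by
  unfold getProductSuggestions_alt
  apply List.map_congr_left
  intro t _
  rw [outer_getD, PySem.Dict.getD_empty, List.nil_append]

-- ===== VERDICT (by name: the statement is the Claim_ definition above) =====
theorem getProductSuggestions_spec : Claim_equal_getProductSuggestions := by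
  intro products search _
  unfold Spec_getProductSuggestions
  rw [A_eq, B_eq]
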